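-- pv_equiv track=rewrite | github.com/Satyansh-Raj/CloudLine-CSPM-for-AWS | backend/app/inventory/data_classifier.py | _highest_sensitivity
-- ===== SOURCE A (Python) =====
-- _SENSITIVITY_MAP: dict[str, str] = {
--     "pii": "critical",
--     "health": "critical",
--     "financial": "high",
--     "credentials": "high",
--     "analytics": "medium",
--     "media": "medium",
--     "logs": "low",
--     "config": "low",
--     "backups": "low",
-- }
--
-- _SENSITIVITY_ORDER: list[str] = [
--     "critical",
--     "high",
--     "medium",
--     "low",
--     "unknown",
-- ]
--
-- def _highest_sensitivity(
--     data_types: list[str],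
-- ) -> str:
--     """Return the highest sensitivity across types."""
--     levels = [
--         _SENSITIVITY_MAP.get(t, "unknown")
--         for t in data_types
--     ]
--     for level in _SENSITIVITY_ORDER:
--         if level in levels:
--             return level
--     return "unknown"
-- ===== SOURCE B (Python) =====
-- _SENSITIVITY_MAP: dict[str, str] = {
--     "pii": "critical",
--     "health": "critical",
--     "financial": "high",
--     "credentials": "high",
--     "analytics": "medium",
--     "media": "medium",
--     "logs": "low",
--     "config": "low",
--     "backups": "low",
-- }
--
-- _SENSITIVITY_ORDER: list[str] = [
--     "critical",
--     "high",
--     "medium",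
--     "low",
--     "unknown",
-- ]
--
--
-- def _highest_sensitivity(
--     data_types: list[str],
-- ) -> str:
--     """Return the highest sensitivity across types (single pass, min rank)."""
--     best = _SENSITIVITY_ORDER.index("unknown")
--     for t in data_types:
--         r = _SENSITIVITY_ORDER.index(_SENSITIVITY_MAP.get(t, "unknown"))
--         if r < best:
--             best = r
--     return _SENSITIVITY_ORDER[best]
-- ===== Notes on version B (the rewrite author's own statement) =====
-- stated objective: alternative
-- what changed: B replaces A's intermediate levels list plus a membership scan over the five-level priority list with a single accumulator pass over data_types that tracks the minimum sensitivity rank and indexes the order list once at the end.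
import Mathlib
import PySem

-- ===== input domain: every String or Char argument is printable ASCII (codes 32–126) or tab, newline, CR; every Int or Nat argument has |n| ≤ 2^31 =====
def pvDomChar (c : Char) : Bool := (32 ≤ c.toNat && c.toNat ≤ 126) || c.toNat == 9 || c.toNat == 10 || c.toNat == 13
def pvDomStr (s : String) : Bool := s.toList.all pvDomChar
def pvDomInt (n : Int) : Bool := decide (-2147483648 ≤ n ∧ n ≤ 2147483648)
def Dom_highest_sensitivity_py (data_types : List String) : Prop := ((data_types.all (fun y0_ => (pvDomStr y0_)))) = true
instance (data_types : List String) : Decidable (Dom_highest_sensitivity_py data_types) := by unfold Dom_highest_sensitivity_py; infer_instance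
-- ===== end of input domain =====

-- B replaces A's intermediate levels list + membership scan over the five-level order
-- by a single accumulator pass over data_types tracking the minimum sensitivity rank ("alternative", same O(n) cost).

-- ===== PORT A =====
def pvSensMap : PySem.Dict String String := PySem.Dict.ofList
  [("pii", "critical"), ("health", "critical"), ("financial", "high"),
   ("credentials", "high"), ("analytics", "medium"), ("media", "medium"),
   ("logs", "low"), ("config", "low"), ("backups", "low")]

def pvOrder : List String := ["critical", "high", "medium", "low", "unknown"]

-- the for-loop over _SENSITIVITY_ORDER with early return
def pvFirstIn (levels : List String) : List String → String
  | [] => "unknown"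
  | x :: xs => if levels.contains x then x else pvFirstIn levels xs

def highest_sensitivity_py (data_types : List String) : String :=
  let levels := data_types.map (fun t => pvSensMap.getD t "unknown")
  pvFirstIn levels pvOrder

-- ===== PORT B =====
-- _SENSITIVITY_ORDER.index(...): the looked-up value is always a value of the map or "unknown",
-- hence always in pvOrder, so index? is always `some`; the `.getD 0` default is unreachable (exact).
def pvRank (t : String) : Nat :=
  (PySem.List.index? pvOrder (pvSensMap.getD t "unknown")).getD 0

def highest_sensitivity_py_alt (data_types : List String) : String :=
  let best := data_types.foldl
    (fun b t => let r := pvRank t; if r < b then r else b)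
    ((PySem.List.index? pvOrder "unknown").getD 0)
  -- _SENSITIVITY_ORDER[best]: best ≤ 4 < len always, so List.getD is exact for this in-range index
  pvOrder.getD best "unknown"

-- ===== PRECONDITION & SPEC =====
def Spec_highest_sensitivity_py (data_types : List String) (out : String) : Prop := out = highest_sensitivity_py_alt data_types
instance (data_types : List String) (out : String) : Decidable (Spec_highest_sensitivity_py data_types out) := by unfold Spec_highest_sensitivity_py; infer_instance

-- ===== CLAIM (what is proved, stated in full; the proofs are below) =====
def Claim_equal_highest_sensitivity_py : Prop := ∀ (data_types : List String), Dom_highest_sensitivity_py data_types → Spec_highest_sensitivity_py data_types (highest_sensitivity_py data_types)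

-- ===== LEMMAS AND PROOFS =====

-- every input string maps to one of the five levels, with its rank
lemma pvSens_cases (t : String) :
    (pvSensMap.getD t "unknown" = "critical" ∧ pvRank t = 0) ∨
    (pvSensMap.getD t "unknown" = "high" ∧ pvRank t = 1) ∨
    (pvSensMap.getD t "unknown" = "medium" ∧ pvRank t = 2) ∨
    (pvSensMap.getD t "unknown" = "low" ∧ pvRank t = 3) ∨
    (pvSensMap.getD t "unknown" = "unknown" ∧ pvRank t = 4) := by
  have hmap : pvSensMap = PySem.Dict.mk
      [("pii", "critical"), ("health", "critical"), ("financial", "high"),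
       ("credentials", "high"), ("analytics", "medium"), ("media", "medium"),
       ("logs", "low"), ("config", "low"), ("backups", "low")] := by decide
  unfold pvRank
  rw [hmap]
  simp only [PySem.Dict.getD, PySem.Dict.get?_mk_cons]
  split_ifs <;> first | decide | (simp [PySem.Dict.get?]; decide)

def pvStep (b : Nat) (t : String) : Nat := let r := pvRank t; if r < b then r else b

lemma pvFold_le (l : List String) (b : Nat) : l.foldl pvStep b ≤ b := by
  induction l generalizing b with
  | nil => simp
  | cons x xs ih =>
    simp only [List.foldl_cons]
    refine le_trans (ih _) ?_
    simp only [pvStep]; split <;> omega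

lemma pvFold_le_rank (l : List String) {t : String} (ht : t ∈ l) :
    ∀ b : Nat, l.foldl pvStep b ≤ pvRank t := by
  induction l with
  | nil => cases ht
  | cons x xs ih =>
    intro b
    simp only [List.foldl_cons]
    rcases List.mem_cons.mp ht with rfl | h
    · refine le_trans (pvFold_le _ _) ?_
      simp only [pvStep]; split <;> omega
    · exact ih h _

lemma pvFold_attain (l : List String) (b : Nat) :
    l.foldl pvStep b = b ∨ ∃ t ∈ l, pvRank t = l.foldl pvStep b := by
  induction l generalizing b with
  | nil => left; rfl
  | cons x xs ih =>
    simp only [List.foldl_cons]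
    rcases ih (pvStep b x) with h | ⟨t, ht, hr⟩
    · rw [h]
      simp only [pvStep]
      split
      · right; exact ⟨x, List.mem_cons_self, rfl⟩
      · left; rfl
    · right; exact ⟨t, List.mem_cons_of_mem _ ht, hr⟩

-- membership in the levels list, rank-wise
lemma pvContains_iff (l : List String) (s : String) :
    ((l.map (fun t => pvSensMap.getD t "unknown")).contains s = true) ↔
    ∃ t ∈ l, pvSensMap.getD t "unknown" = s := by
  simp [List.mem_map]

lemma pvMain (l : List String) :
    pvFirstIn (l.map (fun t => pvSensMap.getD t "unknown")) pvOrder =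
      pvOrder.getD (l.foldl pvStep 4) "unknown" := by
  set levels := l.map (fun t => pvSensMap.getD t "unknown") with hlev
  set m := l.foldl pvStep 4 with hm
  have hm4 : m ≤ 4 := pvFold_le l 4
  -- no element of l has rank below m
  have hlow : ∀ k, k < m → levels.contains (pvOrder.getD k "unknown") = false := by
    intro k hk
    by_contra h
    rw [Bool.not_eq_false, pvContains_iff] at h
    obtain ⟨t, ht, hs⟩ := h
    have hk4 : k ≤ 3 := by omega
    have hr : pvRank t = k := by
      rcases pvSens_cases t with ⟨h1, h2⟩ | ⟨h1, h2⟩ | ⟨h1, h2⟩ | ⟨h1, h2⟩ | ⟨h1, h2⟩ <;>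
        rw [h1] at hs <;> rw [h2] <;> interval_cases k <;> revert hs <;> decide
    have := pvFold_le_rank l ht 4
    omega
  -- if m < 4 the minimum is attained, so level m is present
  have hhit : m < 4 → levels.contains (pvOrder.getD m "unknown") = true := by
    intro hlt
    rcases pvFold_attain l 4 with h | ⟨t, ht, hr⟩
    · omega
    · rw [pvContains_iff]
      refine ⟨t, ht, ?_⟩
      rw [← hm] at hr
      rcases pvSens_cases t with ⟨h1, h2⟩ | ⟨h1, h2⟩ | ⟨h1, h2⟩ | ⟨h1, h2⟩ | ⟨h1, h2⟩ <;>
        rw [h1] <;> rw [h2] at hr <;> rw [← hr] <;> decide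
  interval_cases m
  · have h0 := hhit (by omega)
    simp [pvFirstIn, pvOrder] at h0 ⊢; simp [h0]
  · have h0 := hlow 0 (by omega); have h1 := hhit (by omega)
    simp [pvOrder] at h0 h1 ⊢; simp [pvFirstIn, h0, h1]
  · have h0 := hlow 0 (by omega); have h1 := hlow 1 (by omega); have h2 := hhit (by omega)
    simp [pvOrder] at h0 h1 h2 ⊢; simp [pvFirstIn, h0, h1, h2]
  · have h0 := hlow 0 (by omega); have h1 := hlow 1 (by omega)
    have h2 := hlow 2 (by omega); have h3 := hhit (by omega)
    simp [pvOrder] at h0 h1 h2 h3 ⊢; simp [pvFirstIn, h0, h1, h2, h3]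
  · have h0 := hlow 0 (by omega); have h1 := hlow 1 (by omega)
    have h2 := hlow 2 (by omega); have h3 := hlow 3 (by omega)
    simp [pvOrder] at h0 h1 h2 h3 ⊢
    simp [pvFirstIn, h0, h1, h2, h3]

-- ===== VERDICT (by name: the statement is the Claim_ definition above) =====
theorem highest_sensitivity_py_spec : Claim_equal_highest_sensitivity_py := by
  intro l _
  unfold Spec_highest_sensitivity_py highest_sensitivity_py highest_sensitivity_py_alt
  have hinit : (PySem.List.index? pvOrder "unknown").getD 0 = 4 := by decide
  simp only [hinit]
  have hstep : (fun (b : Nat) (t : String) => let r := pvRank t; if r < b then r else b) = pvStep := rfl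
  rw [hstep]
  exact pvMain l
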